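-- pv_equiv track=rewrite | github.com/EduardF2001/ProiectMPIPrezentare | dp_solver.py | eliminate_pure_literals
-- ===== SOURCE A (Python) =====
-- from collections import Counter
--
-- def eliminate_pure_literals(clauses, assignment):
--     counter = Counter(lit for clause in clauses for lit in clause)
--     assigned = set()
--     for lit in counter:
--         if -lit not in counter:
--             var = abs(lit)
--             val = lit > 0
--             if var not in assignment:
--                 assignment[var] = val
--                 assigned.add(lit)
--
--     if not assigned:
--         return clauses
--
--     new_clauses = []
--     for clause in clauses:
--         if clause & assigned:
--             continue  # clause is satisfied
--         new_clauses.append(clause)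
--     return new_clauses
-- ===== SOURCE B (Python) =====
-- def eliminate_pure_literals(clauses, assignment):
--     # Sort the distinct literals by |lit| so the two polarities of each variable
--     # become adjacent: a variable is pure iff its run has length 1 (and the
--     # literal is nonzero, since 0 is its own negation).
--     lits = sorted({lit for clause in clauses for lit in clause}, key=abs)
--     assigned = set()
--     i = 0
--     while i < len(lits):
--         if i + 1 < len(lits) and abs(lits[i + 1]) == abs(lits[i]):
--             i += 2  # both polarities occur: not pure
--         else:
--             lit = lits[i]
--             if lit != 0:
--                 var = abs(lit)
--                 if var not in assignment:
--                     assignment[var] = lit > 0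
--                     assigned.add(lit)
--             i += 1
--
--     if not assigned:
--         return clauses
--
--     return [clause for clause in clauses if assigned.isdisjoint(clause)]
-- ===== Notes on version B (the rewrite author's own statement) =====
-- stated objective: alternative
-- what changed: B replaces A's Counter plus per-literal negation-membership test by sorting the distinct literals by absolute value and scanning adjacent runs: the two polarities of a variable become neighbours, so a variable is pure iff its run is a singleton; the assigned pure literals then filter the clauses by disjointness.
import Mathlib
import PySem

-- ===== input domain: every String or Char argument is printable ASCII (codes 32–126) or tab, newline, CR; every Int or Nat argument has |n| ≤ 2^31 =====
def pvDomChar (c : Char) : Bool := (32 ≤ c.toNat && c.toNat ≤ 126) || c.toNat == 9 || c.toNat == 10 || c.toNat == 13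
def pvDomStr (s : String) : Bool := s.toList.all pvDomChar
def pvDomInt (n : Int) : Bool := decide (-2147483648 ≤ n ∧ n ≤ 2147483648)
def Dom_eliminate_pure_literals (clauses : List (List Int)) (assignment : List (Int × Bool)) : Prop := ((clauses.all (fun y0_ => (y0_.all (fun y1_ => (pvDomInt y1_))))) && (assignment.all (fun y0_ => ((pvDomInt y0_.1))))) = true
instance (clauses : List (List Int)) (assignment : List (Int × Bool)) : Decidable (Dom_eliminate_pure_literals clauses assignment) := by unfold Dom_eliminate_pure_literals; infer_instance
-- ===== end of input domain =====

-- B replaces A's Counter + per-literal negation-membership test by sorting the distinct literals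
-- by absolute value and scanning adjacent runs: a variable is pure iff its run is a singleton
-- (alternative algorithm, sort-then-scan instead of hashing; same return value). Each inner
-- List Int models a Python set of literals; the proved equivalence is about the RETURN value only
-- (both Pythons also mutate `assignment` in place with the same resulting entries, though possibly
-- in a different key-insertion order).

-- ===== PORT A =====
-- `clause & assigned` (set intersection, truthy = nonempty) is ported as PySem.Set.inter ≠ [].
def eliminate_pure_literals (clauses : List (List Int)) (assignment : List (Int × Bool)) : List (List Int) :=
  -- counter = Counter(lit for clause in clauses for lit in clause)
  let counter : PySem.Dict Int Int := PySem.Dict.counter clauses.flatten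
  -- for lit in counter: … (threads the mutated assignment together with the set `assigned`)
  let st : (List (Int × Bool)) × PySem.Set Int :=
    counter.keys.foldl (fun st lit =>
      if counter.contains (-lit) then st
      else if (PySem.Dict.mk st.1).contains |lit| then st
      else (((PySem.Dict.mk st.1).insert |lit| (decide (0 < lit))).items, PySem.Set.add st.2 lit))
      (assignment, PySem.Set.empty)
  if st.2 = PySem.Set.empty then clauses
  else
    clauses.foldl (fun acc clause =>
      if PySem.Set.inter clause st.2 ≠ [] then acc
      else acc ++ [clause]) []

-- ===== PORT B =====
-- body of B's while loop for a literal whose run is a singleton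
def pvProcB (lit : Int) (st : (List (Int × Bool)) × PySem.Set Int) : (List (Int × Bool)) × PySem.Set Int :=
  if lit ≠ 0 then
    if ¬ (PySem.Dict.mk st.1).contains |lit| then
      (((PySem.Dict.mk st.1).insert |lit| (decide (0 < lit))).items, PySem.Set.add st.2 lit)
    else st
  else st

-- B's while loop over the |·|-sorted distinct literals: a two-element run (both polarities)
-- is skipped, a singleton run is processed
def pvScanB : List Int → (List (Int × Bool)) × PySem.Set Int → (List (Int × Bool)) × PySem.Set Int
  | [], st => st
  | [a], st => pvProcB a st
  | a :: b :: rest, st =>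
      if |b| = |a| then pvScanB rest st
      else pvScanB (b :: rest) (pvProcB a st)

def eliminate_pure_literals_alt (clauses : List (List Int)) (assignment : List (Int × Bool)) : List (List Int) :=
  -- lits = sorted({lit for clause in clauses for lit in clause}, key=abs)
  let lits : List Int := PySem.List.sorted (PySem.Set.ofList clauses.flatten) (fun l => |l|) false
  let st : (List (Int × Bool)) × PySem.Set Int := pvScanB lits (assignment, PySem.Set.empty)
  if st.2 = PySem.Set.empty then clauses
  else clauses.filter (fun clause => PySem.Set.isdisjoint st.2 clause)

-- ===== PRECONDITION & SPEC =====
def Spec_eliminate_pure_literals (clauses : List (List Int)) (assignment : List (Int × Bool)) (out : List (List Int)) : Prop := out = eliminate_pure_literals_alt clauses assignment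
instance (clauses : List (List Int)) (assignment : List (Int × Bool)) (out : List (List Int)) : Decidable (Spec_eliminate_pure_literals clauses assignment out) := by unfold Spec_eliminate_pure_literals; infer_instance

-- ===== CLAIM (what is proved, stated in full; the proofs are below) =====
def Claim_equal_eliminate_pure_literals : Prop := ∀ (clauses : List (List Int)) (assignment : List (Int × Bool)), Dom_eliminate_pure_literals clauses assignment → Spec_eliminate_pure_literals clauses assignment (eliminate_pure_literals clauses assignment)

-- ===== LEMMAS AND PROOFS =====

-- membership in the `assigned` set built by A's loop: exactly the pure literals (their negation
-- absent from the counter) whose variable is not yet an assignment key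
theorem pv_A_loop_mem (ck : PySem.Dict Int Int) :
    ∀ (L : List Int) (asg : List (Int × Bool)) (s : PySem.Set Int),
      L.Nodup → (∀ l ∈ L, ck.contains l = true) →
      ∀ x : Int,
        (x ∈ (L.foldl (fun (st : (List (Int × Bool)) × PySem.Set Int) lit =>
          if ck.contains (-lit) then st
          else if (PySem.Dict.mk st.1).contains |lit| then st
          else (((PySem.Dict.mk st.1).insert |lit| (decide (0 < lit))).items, PySem.Set.add st.2 lit))
          (asg, s)).2 ↔
        x ∈ s ∨ (x ∈ L ∧ ck.contains (-x) = false ∧ |x| ∉ asg.map Prod.fst)) := by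
  intro L
  induction L with
  | nil => intro asg s _ _ x; simp
  | cons l L ih =>
      rintro asg s hnd hck x
      have hlnotin : l ∉ L := (List.nodup_cons.1 hnd).1
      have hnd' : L.Nodup := (List.nodup_cons.1 hnd).2
      have hck' : ∀ a ∈ L, ck.contains a = true := fun a ha => hck a (List.mem_cons_of_mem _ ha)
      have hckl : ck.contains l = true := hck l List.mem_cons_self
      simp only [List.foldl_cons]
      by_cases h1 : ck.contains (-l) = true
      · rw [if_pos h1, ih _ _ hnd' hck']
        constructor
        · rintro (hs | ⟨hxL, hpure, hkey⟩)
          · exact Or.inl hs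
          · exact Or.inr ⟨List.mem_cons_of_mem _ hxL, hpure, hkey⟩
        · rintro (hs | ⟨hxL, hpure, hkey⟩)
          · exact Or.inl hs
          · rcases List.mem_cons.1 hxL with rfl | hxL'
            · rw [hpure] at h1; cases h1
            · exact Or.inr ⟨hxL', hpure, hkey⟩
      · have h1' : ck.contains (-l) = false := by
          cases hb : ck.contains (-l)
          · rfl
          · exact absurd hb h1
        rw [if_neg h1]
        by_cases h2 : (PySem.Dict.mk asg).contains |l| = true
        · rw [if_pos h2, ih _ _ hnd' hck']
          have h2m : |l| ∈ asg.map Prod.fst := (PySem.Dict.contains_iff_mem_keys _ _).1 h2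
          constructor
          · rintro (hs | ⟨hxL, hpure, hkey⟩)
            · exact Or.inl hs
            · exact Or.inr ⟨List.mem_cons_of_mem _ hxL, hpure, hkey⟩
          · rintro (hs | ⟨hxL, hpure, hkey⟩)
            · exact Or.inl hs
            · rcases List.mem_cons.1 hxL with rfl | hxL'
              · exact absurd h2m hkey
              · exact Or.inr ⟨hxL', hpure, hkey⟩
        · rw [if_neg h2, ih _ _ hnd' hck']
          have h2m : |l| ∉ asg.map Prod.fst :=
            fun hm => h2 ((PySem.Dict.contains_iff_mem_keys _ _).2 hm)
          have hkeys : ∀ k : Int,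
              k ∈ (((PySem.Dict.mk asg).insert |l| (decide (0 < l))).items.map Prod.fst) ↔
                k = |l| ∨ k ∈ asg.map Prod.fst := fun k =>
            PySem.Dict.mem_keys_insert (PySem.Dict.mk asg) |l| k _
          rw [PySem.Set.mem_add]
          constructor
          · rintro ((hs | rfl) | ⟨hxL, hpure, hkey⟩)
            · exact Or.inl hs
            · exact Or.inr ⟨List.mem_cons_self, h1', h2m⟩
            · exact Or.inr ⟨List.mem_cons_of_mem _ hxL, hpure,
                fun hm => hkey ((hkeys |x|).2 (Or.inr hm))⟩
          · rintro (hs | ⟨hxL, hpure, hkey⟩)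
            · exact Or.inl (Or.inl hs)
            · rcases List.mem_cons.1 hxL with rfl | hxL'
              · exact Or.inl (Or.inr rfl)
              · have hxl : x ≠ l := fun e => hlnotin (e ▸ hxL')
                have habs : |x| ≠ |l| := by
                  intro he
                  rcases abs_eq_abs.1 he with e | e
                  · exact hxl e
                  · have hxc : ck.contains (-x) = true := by
                      rw [show -x = l by omega]
                      exact hckl
                    rw [hpure] at hxc
                    cases hxc
                refine Or.inr ⟨hxL', hpure, fun hm => ?_⟩
                rcases (hkeys |x|).1 hm with h | h
                · exact habs h
                · exact hkey h


-- membership in the `assigned` set built by B's run scan, for a duplicate-free list that is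
-- nondecreasing in absolute value: exactly the literals whose negation is absent
theorem pv_B_scan_mem :
    ∀ (n : Nat) (L : List Int), L.length = n → L.Nodup → L.Pairwise (fun a b => |a| ≤ |b|) →
      ∀ (asg : List (Int × Bool)) (s : PySem.Set Int) (x : Int),
        (x ∈ (pvScanB L (asg, s)).2 ↔
          x ∈ s ∨ (x ∈ L ∧ -x ∉ L ∧ |x| ∉ asg.map Prod.fst)) := by
  intro n
  induction n using Nat.strong_induction_on with
  | _ n ih =>
    intro L hlen hnd hpw asg s x
    rcases L with _ | ⟨a, _ | ⟨b, rest⟩⟩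
    · simp [pvScanB]
    · -- singleton run: process a
      simp only [pvScanB, pvProcB]
      by_cases ha0 : a = 0
      · subst ha0
        simp only [if_neg (by simp : ¬ ((0:Int) ≠ 0))]
        constructor
        · exact Or.inl
        · rintro (hs | ⟨hx, hnx, _⟩)
          · exact hs
          · rcases List.mem_singleton.1 hx with rfl
            exact absurd (List.mem_singleton.2 (by omega)) hnx
      · rw [if_pos ha0]
        by_cases hk : (PySem.Dict.mk asg).contains |a| = true
        · rw [if_neg (not_not_intro hk)]
          have hkm : |a| ∈ asg.map Prod.fst := (PySem.Dict.contains_iff_mem_keys _ _).1 hk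
          constructor
          · exact Or.inl
          · rintro (hs | ⟨hx, _, hkey⟩)
            · exact hs
            · rcases List.mem_singleton.1 hx with rfl
              exact absurd hkm hkey
        · rw [if_pos hk]
          have hkm : |a| ∉ asg.map Prod.fst :=
            fun hm => hk ((PySem.Dict.contains_iff_mem_keys _ _).2 hm)
          rw [PySem.Set.mem_add]
          constructor
          · rintro (hs | rfl)
            · exact Or.inl hs
            · refine Or.inr ⟨List.mem_singleton.2 rfl, ?_, hkm⟩
              simp only [List.mem_singleton]
              omega
          · rintro (hs | ⟨hx, _, _⟩)
            · exact Or.inl hs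
            · exact Or.inr (List.mem_singleton.1 hx)
    · -- a :: b :: rest
      have hpw1 := (List.pairwise_cons.1 hpw)
      have ha_le : ∀ y ∈ b :: rest, |a| ≤ |y| := hpw1.1
      have hpw' : (b :: rest).Pairwise (fun a b => |a| ≤ |b|) := hpw1.2
      have hb_le : ∀ y ∈ rest, |b| ≤ |y| := (List.pairwise_cons.1 hpw').1
      have hnd1 := List.nodup_cons.1 hnd
      have haT : a ∉ b :: rest := hnd1.1
      have hndT : (b :: rest).Nodup := hnd1.2
      have hbR : b ∉ rest := (List.nodup_cons.1 hndT).1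
      have hndR : rest.Nodup := (List.nodup_cons.1 hndT).2
      by_cases hab : |b| = |a|
      · -- two-element run: b = -a, skip both
        have hne : a ≠ b := fun e => haT (e ▸ List.mem_cons_self)
        have hba : b = -a := by
          rcases abs_eq_abs.1 hab with e | e
          · exact absurd e.symm hne
          · exact e
        have ha0 : a ≠ 0 := by rintro rfl; exact hne (by omega)
        simp only [pvScanB, if_pos hab]
        rw [ih rest.length (by rw [← hlen]; exact Nat.lt_trans (Nat.lt_succ_self _) (Nat.lt_succ_self _)) rest rfl hndR
          ((List.pairwise_cons.1 hpw').2)]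
        have haR : a ∉ rest := fun h => haT (List.mem_cons_of_mem _ h)
        constructor
        · rintro (hs | ⟨hx, hnx, hkey⟩)
          · exact Or.inl hs
          · refine Or.inr ⟨List.mem_cons_of_mem _ (List.mem_cons_of_mem _ hx), ?_, hkey⟩
            intro hm
            rcases List.mem_cons.1 hm with e | hm'
            · exact hbR (by rw [show b = x by omega]; exact hx)
            · rcases List.mem_cons.1 hm' with e | hm''
              · exact haR (by rw [show a = x by omega]; exact hx)
              · exact hnx hm''
        · rintro (hs | ⟨hx, hnx, hkey⟩)
          · exact Or.inl hs
          · rcases List.mem_cons.1 hx with rfl | hx'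
            · exact absurd (List.mem_cons_of_mem _ (by rw [hba]; exact List.mem_cons_self)) hnx
            · rcases List.mem_cons.1 hx' with rfl | hx''
              · exact absurd (List.mem_cons.2 (Or.inl (by omega))) hnx
              · exact Or.inr ⟨hx'', fun h => hnx (List.mem_cons_of_mem _ (List.mem_cons_of_mem _ h)), hkey⟩
      · -- singleton run at a: process a, continue with b :: rest
        have halt : ∀ y ∈ b :: rest, |a| < |y| := by
          intro y hy
          rcases List.mem_cons.1 hy with rfl | hy'
          · exact lt_of_le_of_ne (ha_le _ List.mem_cons_self) (fun e => hab e.symm)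
          · exact lt_of_lt_of_le
              (lt_of_le_of_ne (ha_le _ List.mem_cons_self) (fun e => hab e.symm)) (hb_le _ hy')
        have hT_ne_a : ∀ y ∈ b :: rest, y ≠ a ∧ y ≠ -a ∧ -y ≠ a := by
          intro y hy
          have hlt := halt y hy
          refine ⟨?_, ?_, ?_⟩
          · rintro rfl; exact absurd hlt (lt_irrefl _)
          · rintro rfl; rw [abs_neg] at hlt; exact absurd hlt (lt_irrefl _)
          · intro e
            rw [show y = -a by omega, abs_neg] at hlt
            exact absurd hlt (lt_irrefl _)
        have hihT : ∀ (asg' : List (Int × Bool)) (s' : PySem.Set Int),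
            x ∈ (pvScanB (b :: rest) (asg', s')).2 ↔
              x ∈ s' ∨ (x ∈ b :: rest ∧ -x ∉ b :: rest ∧ |x| ∉ asg'.map Prod.fst) := by
          intro asg' s'
          exact ih (b :: rest).length (by rw [← hlen]; exact Nat.lt_succ_self _) _ rfl hndT hpw' asg' s' x
        simp only [pvScanB, if_neg hab, pvProcB]
        by_cases ha0 : a = 0
        · subst ha0
          simp only [if_neg (by simp : ¬ ((0:Int) ≠ 0))]
          rw [hihT]
          constructor
          · rintro (hs | ⟨hx, hnx, hkey⟩)
            · exact Or.inl hs
            · refine Or.inr ⟨List.mem_cons_of_mem _ hx, ?_, hkey⟩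
              intro hm
              rcases List.mem_cons.1 hm with e | hm'
              · exact (hT_ne_a x hx).2.2 e
              · exact hnx hm'
          · rintro (hs | ⟨hx, hnx, hkey⟩)
            · exact Or.inl hs
            · rcases List.mem_cons.1 hx with rfl | hx'
              · exact absurd (show -(0:Int) ∈ (0:Int) :: b :: rest by simp) hnx
              · exact Or.inr ⟨hx', fun h => hnx (List.mem_cons_of_mem _ h), hkey⟩
        · rw [if_pos ha0]
          by_cases hk : (PySem.Dict.mk asg).contains |a| = true
          · rw [if_neg (not_not_intro hk)]
            have hkm : |a| ∈ asg.map Prod.fst := (PySem.Dict.contains_iff_mem_keys _ _).1 hk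
            rw [hihT]
            constructor
            · rintro (hs | ⟨hx, hnx, hkey⟩)
              · exact Or.inl hs
              · refine Or.inr ⟨List.mem_cons_of_mem _ hx, ?_, hkey⟩
                intro hm
                rcases List.mem_cons.1 hm with e | hm'
                · exact (hT_ne_a x hx).2.2 e
                · exact hnx hm'
            · rintro (hs | ⟨hx, hnx, hkey⟩)
              · exact Or.inl hs
              · rcases List.mem_cons.1 hx with rfl | hx'
                · exact absurd hkm hkey
                · exact Or.inr ⟨hx', fun h => hnx (List.mem_cons_of_mem _ h), hkey⟩
          · rw [if_pos hk]
            have hkm : |a| ∉ asg.map Prod.fst :=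
              fun hm => hk ((PySem.Dict.contains_iff_mem_keys _ _).2 hm)
            have hkeys : ∀ k : Int,
                k ∈ (((PySem.Dict.mk asg).insert |a| (decide (0 < a))).items.map Prod.fst) ↔
                  k = |a| ∨ k ∈ asg.map Prod.fst := fun k =>
              PySem.Dict.mem_keys_insert (PySem.Dict.mk asg) |a| k _
            rw [hihT, PySem.Set.mem_add]
            constructor
            · rintro ((hs | rfl) | ⟨hx, hnx, hkey⟩)
              · exact Or.inl hs
              · refine Or.inr ⟨List.mem_cons_self, ?_, hkm⟩
                intro hm
                rcases List.mem_cons.1 hm with e | hm'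
                · omega
                · exact (hT_ne_a _ hm').2.1 (by omega)
              · refine Or.inr ⟨List.mem_cons_of_mem _ hx, ?_, fun hm => hkey ((hkeys _).2 (Or.inr hm))⟩
                intro hm
                rcases List.mem_cons.1 hm with e | hm'
                · exact (hT_ne_a x hx).2.2 e
                · exact hnx hm'
            · rintro (hs | ⟨hx, hnx, hkey⟩)
              · exact Or.inl (Or.inl hs)
              · rcases List.mem_cons.1 hx with rfl | hx'
                · exact Or.inl (Or.inr rfl)
                · have habs : |x| ≠ |a| := ne_of_gt (halt x hx')
                  refine Or.inr ⟨hx', fun h => hnx (List.mem_cons_of_mem _ h), fun hm => ?_⟩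
                  rcases (hkeys _).1 hm with e | hm'
                  · exact habs e
                  · exact hkey hm'

-- the two `assigned` sets have the same members
theorem pv_assigned_mem_iff (clauses : List (List Int)) (assignment : List (Int × Bool)) :
    ∀ x : Int,
      (x ∈ ((PySem.Dict.counter clauses.flatten).keys.foldl
        (fun (st : (List (Int × Bool)) × PySem.Set Int) lit =>
          if (PySem.Dict.counter clauses.flatten).contains (-lit) then st
          else if (PySem.Dict.mk st.1).contains |lit| then st
          else (((PySem.Dict.mk st.1).insert |lit| (decide (0 < lit))).items, PySem.Set.add st.2 lit))
        (assignment, PySem.Set.empty)).2 ↔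
      x ∈ (pvScanB (PySem.List.sorted (PySem.Set.ofList clauses.flatten) (fun l => |l|) false)
        (assignment, PySem.Set.empty)).2) := by
  intro x
  have hA := pv_A_loop_mem (PySem.Dict.counter clauses.flatten)
    (PySem.Dict.counter clauses.flatten).keys assignment PySem.Set.empty
    (PySem.Dict.nodup_keys_counter _)
    (fun l hl => (PySem.Dict.contains_iff_mem_keys _ _).2 hl)
  rw [hA x]
  have hperm : (PySem.List.sorted (PySem.Set.ofList clauses.flatten) (fun l => |l|) false).Perm
      (PySem.Set.ofList clauses.flatten) := PySem.List.sorted_perm _ _ _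
  have hndL : (PySem.List.sorted (PySem.Set.ofList clauses.flatten) (fun l => |l|) false).Nodup :=
    hperm.nodup_iff.2 (PySem.Set.nodup_ofList _)
  have hpwL : (PySem.List.sorted (PySem.Set.ofList clauses.flatten) (fun l => |l|) false).Pairwise
      (fun a b => |a| ≤ |b|) := PySem.List.sorted_pairwise _ _
  rw [pv_B_scan_mem _ _ rfl hndL hpwL assignment PySem.Set.empty x]
  have hmemL : ∀ y : Int,
      y ∈ PySem.List.sorted (PySem.Set.ofList clauses.flatten) (fun l => |l|) false ↔
        y ∈ clauses.flatten := by
    intro y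
    rw [PySem.List.mem_sorted, PySem.Set.mem_ofList]
  have hcontains : ∀ y : Int, (PySem.Dict.counter clauses.flatten).contains y = false ↔
      y ∉ clauses.flatten := by
    intro y
    rw [PySem.Dict.contains_counter]
    simp
  have hckeys : x ∈ (PySem.Dict.counter clauses.flatten).keys ↔ x ∈ clauses.flatten := by
    rw [PySem.Dict.keys_counter, PySem.Set.mem_ofList]
  simp only [show (PySem.Set.empty : PySem.Set Int) = [] from rfl, List.not_mem_nil, false_or]
  rw [hckeys, hmemL x, hmemL (-x)]
  constructor
  · rintro ⟨h1, h2, h3⟩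
    exact ⟨h1, (hcontains _).1 h2, h3⟩
  · rintro ⟨h1, h2, h3⟩
    exact ⟨h1, (hcontains _).2 h2, h3⟩

-- A's append-unless-intersecting loop equals B's disjointness filter when the two sets agree
theorem pv_filter_eq (sA sB : PySem.Set Int) (hmem : ∀ x : Int, x ∈ sA ↔ x ∈ sB) :
    ∀ (cs : List (List Int)) (acc : List (List Int)),
      cs.foldl (fun acc clause =>
        if PySem.Set.inter clause sA ≠ [] then acc else acc ++ [clause]) acc
      = acc ++ cs.filter (fun clause => PySem.Set.isdisjoint sB clause) := by
  intro cs
  induction cs with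
  | nil => intro acc; simp
  | cons c cs ih =>
      intro acc
      simp only [List.foldl_cons, List.filter_cons]
      have hiff : (PySem.Set.inter c sA ≠ []) ↔ ¬ (PySem.Set.isdisjoint sB c = true) := by
        rw [PySem.Set.isdisjoint_iff]
        constructor
        · intro hne hdisj
          obtain ⟨y, hy⟩ := List.exists_mem_of_ne_nil _ hne
          have hyc := (PySem.Set.mem_inter c sA y).1 hy
          exact hdisj y ((hmem y).1 hyc.2) hyc.1
        · intro hnd hnil
          simp only [not_forall, not_not] at hnd
          obtain ⟨y, hySB, hyc⟩ := hnd
          have : y ∈ PySem.Set.inter c sA :=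
            (PySem.Set.mem_inter c sA y).2 ⟨hyc, (hmem y).2 hySB⟩
          rw [hnil] at this
          simp at this
      by_cases hd : PySem.Set.isdisjoint sB c = true
      · rw [if_neg (fun hne => (hiff.1 hne) hd), hd, ih]
        simp
      · have hd' : PySem.Set.isdisjoint sB c = false := by
          cases hb : PySem.Set.isdisjoint sB c
          · rfl
          · exact absurd hb hd
        rw [if_pos (hiff.2 hd), hd', ih]
        simp

-- ===== VERDICT (by name: the statement is the Claim_ definition above) =====
theorem eliminate_pure_literals_spec : Claim_equal_eliminate_pure_literals := by
  intro clauses assignment _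
  unfold Spec_eliminate_pure_literals eliminate_pure_literals eliminate_pure_literals_alt
  have hmem := pv_assigned_mem_iff clauses assignment
  by_cases hA : ((PySem.Dict.counter clauses.flatten).keys.foldl
      (fun (st : (List (Int × Bool)) × PySem.Set Int) lit =>
        if (PySem.Dict.counter clauses.flatten).contains (-lit) then st
        else if (PySem.Dict.mk st.1).contains |lit| then st
        else (((PySem.Dict.mk st.1).insert |lit| (decide (0 < lit))).items, PySem.Set.add st.2 lit))
      (assignment, PySem.Set.empty)).2 = PySem.Set.empty
  · have hB : (pvScanB (PySem.List.sorted (PySem.Set.ofList clauses.flatten) (fun l => |l|) false)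
        (assignment, PySem.Set.empty)).2 = PySem.Set.empty := by
      refine List.eq_nil_iff_forall_not_mem.mpr ?_
      intro x hx
      have := (hmem x).2 hx
      rw [hA] at this
      simp [PySem.Set.empty] at this
    rw [if_pos hA, if_pos hB]
  · have hB : ¬ (pvScanB (PySem.List.sorted (PySem.Set.ofList clauses.flatten) (fun l => |l|) false)
        (assignment, PySem.Set.empty)).2 = PySem.Set.empty := by
      intro hB
      apply hA
      refine List.eq_nil_iff_forall_not_mem.mpr ?_
      intro x hx
      have := (hmem x).1 hx
      rw [hB] at this
      simp [PySem.Set.empty] at this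
    rw [if_neg hA, if_neg hB, pv_filter_eq _ _ hmem, List.nil_append]
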